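-- pv_equiv track=rewrite | github.com/m8ngotree/SWE-World | data_preparation/make_test_spec_for_rl.py | shard_list
-- ===== SOURCE A (Python) =====
-- from typing import Any, Dict, Iterable, List, Tuple
--
-- def shard_list(data: List[Dict[str, Any]], num_shards: int) -> List[List[Dict[str, Any]]]:
--     """Split data evenly into num_shards parts."""
--     if num_shards <= 0:
--         raise ValueError("num_shards must be positive")
--     if len(data) == 0:
--         return [[] for _ in range(num_shards)]
--
--     shards: List[List[Dict[str, Any]]] = [[] for _ in range(num_shards)]
--     for i, item in enumerate(data):
--         shards[i % num_shards].append(item)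
--     return shards
-- ===== SOURCE B (Python) =====
-- from typing import Any, Dict, List
--
-- def shard_list(data: List[Dict[str, Any]], num_shards: int) -> List[List[Dict[str, Any]]]:
--     """Split data evenly into num_shards parts (round-robin), via strided slices."""
--     if num_shards <= 0:
--         raise ValueError("num_shards must be positive")
--     return [data[j::num_shards] for j in range(num_shards)]
-- ===== Notes on version B (the rewrite author's own statement) =====
-- stated objective: idiomatic
-- what changed: Replaces the enumerate-and-append loop over the data (indexing shards by i % num_shards) with a comprehension over shard indices that builds each shard directly as the strided slice data[j::num_shards]; the empty-data special case disappears.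
import Mathlib
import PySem

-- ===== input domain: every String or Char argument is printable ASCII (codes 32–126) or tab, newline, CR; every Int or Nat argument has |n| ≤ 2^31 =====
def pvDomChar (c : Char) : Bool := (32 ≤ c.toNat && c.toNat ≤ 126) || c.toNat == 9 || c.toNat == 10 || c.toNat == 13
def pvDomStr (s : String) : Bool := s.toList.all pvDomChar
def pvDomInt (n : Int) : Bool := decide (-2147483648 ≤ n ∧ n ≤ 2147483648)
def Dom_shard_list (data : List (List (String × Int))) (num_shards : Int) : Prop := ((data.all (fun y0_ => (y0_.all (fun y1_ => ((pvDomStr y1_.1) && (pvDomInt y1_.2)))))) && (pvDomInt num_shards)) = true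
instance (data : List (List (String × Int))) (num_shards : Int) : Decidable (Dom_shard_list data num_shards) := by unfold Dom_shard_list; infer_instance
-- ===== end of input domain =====

-- ===== PORT A =====
-- B replaces the walk over `data` with one strided slice per shard index (idiomatic rewrite).
def shard_list (data : List (List (String × Int))) (num_shards : Int) : List (List (List (String × Int))) :=
  if num_shards ≤ 0 then []  -- Python raises ValueError here; excluded by Pre_
  else if data.length = 0 then List.replicate num_shards.toNat []
  else
    (PySem.List.enumerate data).foldl
      (fun shards p => shards.modify (PySem.Int.mod p.1 num_shards).toNat (fun s => s ++ [p.2]))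
      (List.replicate num_shards.toNat [])

-- ===== PORT B =====
def shard_list_alt (data : List (List (String × Int))) (num_shards : Int) : List (List (List (String × Int))) :=
  if num_shards ≤ 0 then []  -- Python raises ValueError here; excluded by Pre_
  else
    (PySem.List.pyRange 0 num_shards 1).map
      (fun j => (PySem.List.slice? data (some j) none num_shards).getD [])

-- ===== PRECONDITION & SPEC =====
-- A raises ValueError when num_shards <= 0 (and B keeps the same guard); A is total otherwise.
def Pre_shard_list (data : List (List (String × Int))) (num_shards : Int) : Prop := 0 < num_shards
instance (data : List (List (String × Int))) (num_shards : Int) : Decidable (Pre_shard_list data num_shards) := by unfold Pre_shard_list; infer_instance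
def pvWitness_shard_list : (List (List (String × Int))) × Int := ([[("a", 1)], [("b", 2)], []], 2)
def Spec_shard_list (data : List (List (String × Int))) (num_shards : Int) (out : List (List (List (String × Int)))) : Prop := out = shard_list_alt data num_shards
instance (data : List (List (String × Int))) (num_shards : Int) (out : List (List (List (String × Int)))) : Decidable (Spec_shard_list data num_shards out) := by unfold Spec_shard_list; infer_instance

-- ===== CLAIM (what is proved, stated in full; the proofs are below) =====
def Claim_equal_shard_list : Prop := ∀ (data : List (List (String × Int))) (num_shards : Int), Dom_shard_list data num_shards → Pre_shard_list data num_shards → Spec_shard_list data num_shards (shard_list data num_shards)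

-- ===== LEMMAS AND PROOFS =====

-- every m-th element of l, starting after skipping d elements
def strideD {a : Type} (m : Nat) : List a → Nat → List a
  | [], _ => []
  | x :: l, d => if d = 0 then x :: strideD m l (m - 1) else strideD m l (d - 1)

theorem strideD_nil_of_le {a : Type} (m : Nat) (l : List a) (d : Nat) (h : l.length ≤ d) :
    strideD m l d = [] := by
  induction l generalizing d with
  | nil => rfl
  | cons x t ih =>
    simp only [List.length_cons] at h
    have hd : d ≠ 0 := by omega
    simp only [strideD, if_neg hd]
    exact ih (d - 1) (by omega)

theorem mod_two_mul {x m : Nat} (h : x < 2 * m) : x % m = if x < m then x else x - m := by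
  split
  · exact Nat.mod_eq_of_lt (by omega)
  · rw [Nat.mod_eq_sub_mod (by omega)]
    exact Nat.mod_eq_of_lt (by omega)

theorem succ_mod (s m : Nat) (hm : 0 < m) :
    (s + 1) % m = if s % m + 1 = m then 0 else s % m + 1 := by
  have ha := Nat.mod_lt s hm
  rcases Nat.lt_or_ge 1 m with h2 | h2
  · rw [Nat.add_mod, Nat.mod_eq_of_lt h2, mod_two_mul (x := s % m + 1) (by omega)]
    split_ifs <;> omega
  · have hm1 : m = 1 := by omega
    subst hm1; simp [Nat.mod_one]

theorem dist_zero_iff (m j s : Nat) (hm : 0 < m) (hj : j < m) :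
    ((j + m - s % m) % m = 0 ↔ j = s % m) := by
  have ha := Nat.mod_lt s hm
  rw [mod_two_mul (x := j + m - s % m) (by omega)]
  split_ifs <;> omega

theorem dist_step_eq (m j s : Nat) (hm : 0 < m) (hj : j < m) (h : j = s % m) :
    (j + m - (s + 1) % m) % m = m - 1 := by
  have ha := Nat.mod_lt s hm
  rw [succ_mod s m hm]
  split_ifs with h1
  · rw [mod_two_mul (x := j + m - 0) (by omega)]; split_ifs <;> omega
  · rw [mod_two_mul (x := j + m - (s % m + 1)) (by omega)]; split_ifs <;> omega

theorem dist_step_ne (m j s : Nat) (hm : 0 < m) (hj : j < m) (h : j ≠ s % m) :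
    (j + m - (s + 1) % m) % m = (j + m - s % m) % m - 1 := by
  have ha := Nat.mod_lt s hm
  rw [succ_mod s m hm]
  split_ifs with h1
  · rw [mod_two_mul (x := j + m - 0) (by omega), mod_two_mul (x := j + m - s % m) (by omega)]
    split_ifs <;> omega
  · rw [mod_two_mul (x := j + m - (s % m + 1)) (by omega), mod_two_mul (x := j + m - s % m) (by omega)]
    split_ifs <;> omega

theorem pymod_natCast (s m : Nat) (hm : 0 < m) :
    PySem.Int.mod (s : Int) (m : Int) = ((s % m : Nat) : Int) := by
  have h : ((s : Int).fmod (m : Int)) = (s : Int) % (m : Int) := by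
    rw [Int.fmod_eq_emod]; simp
  simp [PySem.Int.mod, h]

theorem modify_map_range {a : Type} (m : Nat) (g : Nat → a) (k : Nat) (hk : k < m) (f : a → a) :
    ((List.range m).map g).modify k f = (List.range m).map (fun j => if j = k then f (g j) else g j) := by
  apply List.ext_getElem?
  intro i
  simp [List.getElem?_modify]
  by_cases hi : i < m <;> by_cases hik : i = k
  · simp_all
  · simp_all [Ne.symm hik]
  · simp_all
  · simp_all

-- invariant of A's enumerate-and-append fold: shard j still waits (j - s) mod m steps for its next element
theorem foldA (m : Nat) (hm : 0 < m) (l : List (List (String × Int))) :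
    ∀ (s : Nat) (g : Nat → List (List (String × Int))),
    List.foldl
      (fun shards p => shards.modify (PySem.Int.mod p.1 (m : Int)).toNat (fun t => t ++ [p.2]))
      ((List.range m).map g) (PySem.List.enumerate l (s : Int))
    = (List.range m).map (fun j => g j ++ strideD m l ((j + m - s % m) % m)) := by
  induction l with
  | nil =>
    intro s g
    simp [PySem.List.enumerate, strideD]
  | cons x t ih =>
    intro s g
    have ha := Nat.mod_lt s hm
    simp only [PySem.List.enumerate, List.foldl_cons]
    rw [pymod_natCast s m hm]
    rw [show ((((s % m : Nat) : Int)).toNat) = s % m by omega]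
    rw [modify_map_range m g (s % m) ha]
    rw [show ((s : Int) + 1) = ((s + 1 : Nat) : Int) by push_cast; ring]
    rw [ih (s + 1) _]
    apply List.map_congr_left
    intro j hj
    rw [List.mem_range] at hj
    by_cases hjs : j = s % m
    · simp only [if_pos hjs]
      have h0 : (j + m - s % m) % m = 0 := (dist_zero_iff m j s hm hj).2 hjs
      rw [h0]
      simp only [strideD, dist_step_eq m j s hm hj hjs]
      simp
    · simp only [if_neg hjs]
      have h0 : (j + m - s % m) % m ≠ 0 := fun h => hjs ((dist_zero_iff m j s hm hj).1 h)
      rw [dist_step_ne m j s hm hj hjs]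
      conv_rhs => rw [strideD]
      rw [if_neg h0]

-- the strided filterMap that slice? produces is strideD
theorem filterMap_stride {a : Type} (m : Nat) (hm : 0 < m) (l : List a) :
    ∀ (j : Nat), j < l.length →
    (List.range ((l.length - j + m - 1) / m)).filterMap (fun k => l[j + m * k]?) = strideD m l j := by
  induction l with
  | nil => intro j hj; simp at hj
  | cons x t ih =>
    intro j hj
    match j with
    | 0 =>
      have hc : ((x :: t).length - 0 + m - 1) / m = t.length / m + 1 := by
        simp only [List.length_cons, Nat.sub_zero]
        rw [show t.length + 1 + m - 1 = t.length + m by omega, Nat.add_div_right _ hm]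
      rw [hc, List.range_succ_eq_map, List.filterMap_cons]
      simp only [Nat.mul_zero, Nat.add_zero, List.getElem?_cons_zero, List.filterMap_map]
      have hfun : ((fun k => (x :: t)[0 + m * k]?) ∘ Nat.succ) = (fun k => t[(m - 1) + m * k]?) := by
        funext k
        simp only [Function.comp, Nat.succ_eq_add_one]
        rw [show 0 + m * (k + 1) = ((m - 1) + m * k) + 1 from by
          obtain ⟨m', rfl⟩ : ∃ m', m = m' + 1 := ⟨m - 1, by omega⟩
          simp only [Nat.add_sub_cancel]; ring]
        rw [List.getElem?_cons_succ]
      rw [hfun]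
      rcases Nat.lt_or_ge (m - 1) t.length with hlt | hge
      · rw [show t.length / m = (t.length - (m - 1) + m - 1) / m from by congr 1; omega]
        rw [ih (m - 1) hlt]
        conv_rhs => rw [strideD]
        rw [if_pos rfl]
      · rw [Nat.div_eq_of_lt (by omega), List.range_zero, List.filterMap_nil]
        conv_rhs => rw [strideD]
        rw [if_pos rfl, strideD_nil_of_le m t (m - 1) hge]
    | j' + 1 =>
      simp only [List.length_cons] at hj
      have hj' : j' < t.length := by omega
      have hc : ((x :: t).length - (j' + 1) + m - 1) / m = (t.length - j' + m - 1) / m := by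
        simp only [List.length_cons]; congr 1; omega
      have hfun : (fun k => (x :: t)[j' + 1 + m * k]?) = (fun k => t[j' + m * k]?) := by
        funext k
        rw [show j' + 1 + m * k = (j' + m * k) + 1 from by ring]
        rw [List.getElem?_cons_succ]
      rw [hc, hfun, ih j' hj']
      conv_rhs => rw [strideD]
      simp

-- the positive-step slice data[j::m] is strideD
theorem slice?_stride {a : Type} (m : Nat) (hm : 0 < m) (l : List a) (j : Nat) :
    PySem.List.slice? l (some (j : Int)) none (m : Int) = some (strideD m l j) := by
  have hm0 : ¬((m : Int) = 0) := by omega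
  have hmneg : ¬((m : Int) < 0) := by omega
  have hjneg : ¬((j : Int) < 0) := by omega
  simp only [PySem.List.slice?, PySem.List.sliceIndices, if_neg hm0, if_neg hmneg, if_neg hjneg]
  rcases Nat.lt_or_ge j l.length with hlt | hge
  · have hmin : min (j : Int) (l.length : Int) = (j : Int) := by omega
    rw [hmin, if_pos (by omega : (0:Int) < (m:Int)), if_pos (by omega : (j:Int) < (l.length:Int))]
    have hcount : (((l.length : Int) - (j:Int) + (m:Int) - 1) / (m:Int)).toNat
        = (l.length - j + m - 1) / m := by
      rw [show ((l.length : Int) - (j:Int) + (m:Int) - 1) = ((l.length - j + m - 1 : Nat) : Int) by omega]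
      rw [← Int.natCast_div, Int.toNat_natCast]
    have hfun : (fun k : Nat => l[((j : Int) + (m : Int) * (k : Int)).toNat]?)
        = (fun k : Nat => l[j + m * k]?) := by
      funext k
      rw [show ((j : Int) + (m : Int) * (k : Int)) = ((j + m * k : Nat) : Int) by push_cast; ring,
        Int.toNat_natCast]
    rw [hcount, hfun, filterMap_stride m hm l j hlt]
  · have hmin : min (j : Int) (l.length : Int) = (l.length : Int) := by omega
    rw [hmin, if_pos (by omega : (0:Int) < (m:Int)), if_neg (by omega : ¬((l.length:Int) < (l.length:Int)))]
    rw [List.range_zero, List.filterMap_nil, strideD_nil_of_le m l j hge]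

theorem alt_eq_map_stride (data : List (List (String × Int))) (n : Int) (hpre : 0 < n) :
    shard_list_alt data n
      = (List.range n.toNat).map (fun j => strideD n.toNat data j) := by
  unfold shard_list_alt
  rw [if_neg (by omega)]
  rw [PySem.List.pyRange_one, List.map_map]
  rw [show (n - 0).toNat = n.toNat by omega]
  apply List.map_congr_left
  intro k _
  simp only [Function.comp, Int.zero_add]
  rw [show (n : Int) = ((n.toNat : Nat) : Int) by omega]
  rw [slice?_stride n.toNat (by omega) data k]
  rfl

-- ===== VERDICT (by name: the statement is the Claim_ definition above) =====
theorem shard_list_spec : Claim_equal_shard_list := by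
  intro data n _ hpre
  unfold Pre_shard_list at hpre
  unfold Spec_shard_list
  rw [alt_eq_map_stride data n hpre]
  unfold shard_list
  rw [if_neg (by omega)]
  have hm : 0 < n.toNat := by omega
  have hrep : List.replicate n.toNat ([] : List (List (String × Int)))
      = (List.range n.toNat).map (fun _ => []) := by
    rw [List.map_const', List.length_range]
  by_cases hempty : data.length = 0
  · rw [if_pos hempty, hrep]
    have hnil : data = [] := List.length_eq_zero_iff.mp hempty
    subst hnil
    apply List.map_congr_left
    intro j _
    simp [strideD]
  · rw [if_neg hempty, hrep]
    rw [show (n : Int) = ((n.toNat : Nat) : Int) by omega]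
    rw [show (0 : Int) = ((0 : Nat) : Int) by simp]
    simp only [Int.toNat_natCast]
    rw [foldA n.toNat hm data 0 (fun _ => [])]
    apply List.map_congr_left
    intro j hj
    rw [List.mem_range] at hj
    rw [Nat.zero_mod, Nat.sub_zero, Nat.add_mod_right, Nat.mod_eq_of_lt hj]
    simp
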